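-- pv_equiv track=rewrite | github.com/mitsushino/yukicoder | no11.py | make_group
-- ===== SOURCE A (Python) =====
-- def make_group(card_list):
--     card_dic = {}
--     mark_set = set()
--     number_set = set()
--     for card in card_list:
--         if card[0] not in card_dic:
--             card_dic[card[0]] = set()
--         card_dic[card[0]].add(card[1])
--         mark_set.add(card[0])
--         number_set.add(card[1])
--     return card_dic, mark_set, number_set
-- ===== SOURCE B (Python) =====
-- def make_group(card_list):
--     marks = list(dict.fromkeys(mark for mark, _ in card_list))
--     card_dic = {m: {num for mark, num in card_list if mark == m} for m in marks}
--     number_set = {num for _, num in card_list}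
--     return card_dic, set(marks), number_set
-- ===== Notes on version B (the rewrite author's own statement) =====
-- stated objective: alternative
-- what changed: Replaces A's single pass that maintains three accumulators in lock-step by a two-phase algorithm: first dedup the marks (dict.fromkeys), then build each group by filtering the whole list once per distinct mark; the number set comes from a separate projection.
import Mathlib
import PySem

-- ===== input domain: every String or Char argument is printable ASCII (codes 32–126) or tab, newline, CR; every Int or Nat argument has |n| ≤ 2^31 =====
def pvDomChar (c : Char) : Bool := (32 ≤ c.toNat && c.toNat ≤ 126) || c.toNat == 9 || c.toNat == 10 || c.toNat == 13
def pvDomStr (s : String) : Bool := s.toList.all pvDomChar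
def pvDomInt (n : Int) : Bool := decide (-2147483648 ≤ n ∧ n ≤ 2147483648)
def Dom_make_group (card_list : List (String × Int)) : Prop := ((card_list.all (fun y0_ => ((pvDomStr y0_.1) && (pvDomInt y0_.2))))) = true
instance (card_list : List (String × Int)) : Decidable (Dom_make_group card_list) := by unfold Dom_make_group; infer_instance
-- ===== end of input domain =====

-- B replaces A's single pass with three lock-step accumulators by a two-phase algorithm:
-- dedup the marks first, then build each group by filtering the whole list per mark
-- (objective: alternative decomposition, same results).

-- ===== PORT A =====
def make_group (card_list : List (String × Int)) : (List (String × List Int)) × List String × List Int :=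
  let st := card_list.foldl
    (fun (st : PySem.Dict String (PySem.Set Int) × PySem.Set String × PySem.Set Int) card =>
      let d := if st.1.contains card.1 then st.1 else st.1.insert card.1 PySem.Set.empty
      let d := d.modify card.1 PySem.Set.empty (fun s => PySem.Set.add s card.2)
      (d, PySem.Set.add st.2.1 card.1, PySem.Set.add st.2.2 card.2))
    (PySem.Dict.empty, PySem.Set.empty, PySem.Set.empty)
  (st.1.items, st.2.1, st.2.2)

-- ===== PORT B =====
def make_group_alt (card_list : List (String × Int)) : (List (String × List Int)) × List String × List Int :=
  let marks := PySem.List.dedup (card_list.map (·.1))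
  let card_dic : PySem.Dict String (PySem.Set Int) :=
    PySem.Dict.ofList (marks.map (fun m =>
      (m, PySem.Set.ofList ((card_list.filter (fun c => c.1 == m)).map (·.2)))))
  (card_dic.items, PySem.Set.ofList marks, PySem.Set.ofList (card_list.map (·.2)))

-- ===== PRECONDITION & SPEC =====
def Spec_make_group (card_list : List (String × Int)) (out : (List (String × List Int)) × List String × List Int) : Prop := out = make_group_alt card_list
instance (card_list : List (String × Int)) (out : (List (String × List Int)) × List String × List Int) : Decidable (Spec_make_group card_list out) := by unfold Spec_make_group; infer_instance

-- ===== CLAIM (what is proved, stated in full; the proofs are below) =====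
def Claim_equal_make_group : Prop := ∀ (card_list : List (String × Int)), Dom_make_group card_list → Spec_make_group card_list (make_group card_list)

-- ===== LEMMAS AND PROOFS =====

-- A's dict-updating step, in isolation.
def pvStepD (d : PySem.Dict String (PySem.Set Int)) (card : String × Int) : PySem.Dict String (PySem.Set Int) :=
  (if d.contains card.1 then d else d.insert card.1 PySem.Set.empty).modify card.1 PySem.Set.empty
    (fun s => PySem.Set.add s card.2)

-- one step: lookup with default ∅
theorem pvStepD_getD (d : PySem.Dict String (PySem.Set Int)) (c : String × Int) (m : String) :
    (pvStepD d c).getD m PySem.Set.empty =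
      if m = c.1 then PySem.Set.add (d.getD c.1 PySem.Set.empty) c.2
      else d.getD m PySem.Set.empty := by
  unfold pvStepD
  by_cases h : d.contains c.1
  · simp [h, PySem.Dict.getD_modify]
  · simp only [Bool.not_eq_true] at h
    rw [if_neg (by simp [h]), PySem.Dict.getD_modify]
    by_cases h1 : m = c.1
    · subst h1
      rw [if_pos rfl, if_pos rfl, PySem.Dict.getD_insert, if_pos rfl,
        PySem.Dict.getD_of_not_contains d PySem.Set.empty h]
    · rw [if_neg h1, if_neg h1, PySem.Dict.getD_insert, if_neg h1]

-- the value stored at m after A's dict loop is the per-mark set-update of the start value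
theorem pvFoldD_getD (l : List (String × Int)) (d : PySem.Dict String (PySem.Set Int)) (m : String) :
    (l.foldl pvStepD d).getD m PySem.Set.empty =
      PySem.Set.update (d.getD m PySem.Set.empty) ((l.filter (fun c => c.1 == m)).map (·.2)) := by
  induction l generalizing d with
  | nil => simp [PySem.Set.update]
  | cons c l ih =>
    simp only [List.foldl_cons, List.filter_cons]
    rw [ih, pvStepD_getD]
    by_cases h : c.1 = m
    · subst h; simp [PySem.Set.update_cons]
    · have : ¬ m = c.1 := fun hh => h hh.symm
      simp [h, this]

-- the keys after A's dict loop are the start keys updated with the marks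
theorem pvFoldD_keys (l : List (String × Int)) (d : PySem.Dict String (PySem.Set Int)) :
    (l.foldl pvStepD d).keys = PySem.Set.update d.keys (l.map (·.1)) := by
  induction l generalizing d with
  | nil => simp [PySem.Set.update]
  | cons c l ih =>
    simp only [List.foldl_cons, List.map_cons]
    rw [ih, PySem.Set.update_cons]
    congr 1
    unfold pvStepD
    by_cases h : d.contains c.1 = true
    · rw [if_pos h, PySem.Dict.keys_modify, PySem.Dict.keys_insert_of_contains _ _ h,
        PySem.Set.add_of_mem ((PySem.Dict.contains_iff_mem_keys _ _).mp h)]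
    · simp only [Bool.not_eq_true] at h
      have hnm : c.1 ∉ d.keys := fun hm => by
        simp [(PySem.Dict.contains_iff_mem_keys d c.1).mpr hm] at h
      rw [if_neg (by simp [h]), PySem.Dict.keys_modify,
        PySem.Dict.keys_insert_of_contains _ _ (PySem.Dict.contains_insert_self d c.1 PySem.Set.empty),
        PySem.Dict.keys_insert_of_not_contains _ _ h, PySem.Set.add_of_not_mem hnm]

-- A's three-accumulator loop splits into the dict loop and two set updates
theorem pvTripleFold (l : List (String × Int)) (d : PySem.Dict String (PySem.Set Int))
    (ms : PySem.Set String) (ns : PySem.Set Int) :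
    l.foldl
      (fun (st : PySem.Dict String (PySem.Set Int) × PySem.Set String × PySem.Set Int) card =>
        let d := if st.1.contains card.1 then st.1 else st.1.insert card.1 PySem.Set.empty
        let d := d.modify card.1 PySem.Set.empty (fun s => PySem.Set.add s card.2)
        (d, PySem.Set.add st.2.1 card.1, PySem.Set.add st.2.2 card.2))
      (d, ms, ns)
    = (l.foldl pvStepD d, PySem.Set.update ms (l.map (·.1)), PySem.Set.update ns (l.map (·.2))) := by
  induction l generalizing d ms ns with
  | nil => simp [PySem.Set.update]
  | cons c l ih =>
    simp only [List.foldl_cons, List.map_cons]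
    rw [PySem.Set.update_cons, PySem.Set.update_cons, ← ih]
    rfl

-- ===== VERDICT (by name: the statement is the Claim_ definition above) =====
theorem make_group_spec : Claim_equal_make_group := by
  intro card_list _
  show _ = _
  simp only [make_group, make_group_alt]
  rw [pvTripleFold]
  have hkeys : (card_list.foldl pvStepD PySem.Dict.empty).keys
      = PySem.Set.ofList (card_list.map (·.1)) := by
    rw [pvFoldD_keys]; rfl
  have hnd : (card_list.foldl pvStepD PySem.Dict.empty).keys.Nodup := by
    rw [hkeys]; exact PySem.Set.nodup_ofList _
  have hitems : (card_list.foldl pvStepD PySem.Dict.empty).items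
      = (PySem.Set.ofList (card_list.map (·.1))).map (fun m =>
          (m, PySem.Set.ofList ((card_list.filter (fun c => c.1 == m)).map (·.2)))) := by
    rw [PySem.Dict.items_eq_map_keys _ hnd PySem.Set.empty, hkeys]
    refine List.map_congr_left (fun m _ => ?_)
    rw [pvFoldD_getD]
    simp [PySem.Set.update_nil_left, PySem.Set.empty]
  have hBgen : ∀ (pairs : List (String × PySem.Set Int)), (pairs.map (·.1)).Nodup →
      (PySem.Dict.ofList pairs).items = pairs := by
    intro pairs hp
    have h0 : PySem.Dict.ofList pairs
        = pairs.foldl (fun d p => d.insert p.1 p.2) PySem.Dict.empty := rfl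
    rw [h0, PySem.Dict.items_foldl_insert_fresh pairs (·.1) (·.2) PySem.Dict.empty
      (by intro a _; rfl) hp]
    simp [show PySem.Dict.empty.items = ([] : List (String × PySem.Set Int)) from rfl]
  have hB : (PySem.Dict.ofList ((PySem.List.dedup (card_list.map (·.1))).map (fun m =>
        (m, PySem.Set.ofList ((card_list.filter (fun c => c.1 == m)).map (·.2)))))).items
      = (PySem.Set.ofList (card_list.map (·.1))).map (fun m =>
          (m, PySem.Set.ofList ((card_list.filter (fun c => c.1 == m)).map (·.2)))) := by
    simp only [PySem.List.dedup_eq_ofList]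
    apply hBgen
    simp only [List.map_map, Function.comp_def]
    simp [PySem.Set.nodup_ofList (card_list.map (·.1))]
  rw [hitems, hB]
  simp only [PySem.List.dedup_eq_ofList, PySem.Set.ofList_ofList]
  rfl
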